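-- pv_equiv track=rewrite | github.com/chrismcgale/leetCode | medium/predictWinner.py | predictTheWinnerTopDown
-- ===== SOURCE A (Python) =====
-- from typing import List
--
-- def predictTheWinnerTopDown(nums: List[int]) -> bool:
--     n = len(nums)
--     dp = [[0] * n for _ in range(n)]
--
--     # dp[i][j] means nums i - j still available so max value for dp[i][i] is nums[i]
--     for i in range(n):
--         dp[i][i] = nums[i]
--
--     # Work your way up and right solving for the best they can achieve
--     for d in range(1, n):
--         for left in range(n - d):
--             right = left + d
--             dp[left][right] = max(nums[left] - dp[left + 1][right], nums[right] - dp[left][right - 1])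
--
--     return dp[0][n - 1] >= 0
-- ===== SOURCE B (Python) =====
-- from typing import List
--
-- def predictTheWinnerTopDown(nums: List[int]) -> bool:
--     # Top-down memoized recursion over intervals instead of a bottom-up table:
--     # score(i, j) = optimal score difference the current player achieves on nums[i..j].
--     memo = {}
--
--     def score(i: int, j: int) -> int:
--         if (i, j) in memo:
--             return memo[(i, j)]
--         if i == j:
--             res = nums[i]
--         else:
--             res = max(nums[i] - score(i + 1, j), nums[j] - score(i, j - 1))
--         memo[(i, j)] = res
--         return res
--
--     return score(0, len(nums) - 1) >= 0
-- ===== Notes on version B (the rewrite author's own statement) =====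
-- stated objective: alternative
-- what changed: Replaces A's bottom-up iteration over an n x n table swept by diagonal length with a top-down memoized recursion score(i, j) over shrinking intervals cached in a dict; no table, no index loops.
import Mathlib
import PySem

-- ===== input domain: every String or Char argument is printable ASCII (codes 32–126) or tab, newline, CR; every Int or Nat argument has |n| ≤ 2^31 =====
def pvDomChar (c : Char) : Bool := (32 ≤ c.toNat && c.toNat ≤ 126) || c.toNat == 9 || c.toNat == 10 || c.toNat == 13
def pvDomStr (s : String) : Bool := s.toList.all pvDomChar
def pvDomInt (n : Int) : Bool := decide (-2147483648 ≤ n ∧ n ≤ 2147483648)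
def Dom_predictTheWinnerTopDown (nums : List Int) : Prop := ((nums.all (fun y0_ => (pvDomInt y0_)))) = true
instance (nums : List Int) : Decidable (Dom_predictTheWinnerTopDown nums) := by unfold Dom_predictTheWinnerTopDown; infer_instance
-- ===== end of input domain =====

-- B replaces A's bottom-up diagonal table iteration with a top-down memoized recursion
-- score(i, j) cached in a dict (same cost, different decomposition); equal on all non-empty lists.

-- ===== PORT A =====
-- literal transliteration of A: full n×n table, diagonal init, then diagonals d = 1 .. n-1
def predictTheWinnerTopDown (nums : List Int) : Bool :=
  let n := nums.length
  let dp0 : List (List Int) := List.replicate n (List.replicate n (0 : Int))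
  let dp1 := (List.range n).foldl
    (fun dp i => dp.set i ((dp.getD i []).set i (nums.getD i 0))) dp0
  let dp2 := (List.range' 1 (n - 1)).foldl (fun dp d =>
    (List.range (n - d)).foldl (fun dp left =>
      let right := left + d
      dp.set left ((dp.getD left []).set right
        (max (nums.getD left 0 - (dp.getD (left + 1) []).getD right 0)
             (nums.getD right 0 - (dp.getD left []).getD (right - 1) 0)))) dp) dp1
  decide (0 ≤ (dp2.getD 0 []).getD (n - 1) 0)

-- ===== PORT B =====
-- literal transliteration of B's inner `score(i, j)`: memo lookup, base case i = j, else the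
-- two recursive calls threading the memo dict, then cache the result.  Indices are Nats; the
-- base-case guard `j ≤ i` coincides with Python's `i == j` on every reachable call (the
-- recursion keeps i ≤ j), and also makes the function total.
def scoreM (nums : List Int) (i j : Nat) (memo : PySem.Dict (Nat × Nat) Int) :
    Int × PySem.Dict (Nat × Nat) Int :=
  if memo.contains (i, j) then (memo.getD (i, j) 0, memo)
  else if _h : j ≤ i then
    let res := nums.getD i 0
    (res, memo.insert (i, j) res)
  else
    let p1 := scoreM nums (i + 1) j memo
    let p2 := scoreM nums i (j - 1) p1.2
    let res := max (nums.getD i 0 - p1.1) (nums.getD j 0 - p2.1)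
    (res, p2.2.insert (i, j) res)
termination_by j - i
decreasing_by all_goals omega

def predictTheWinnerTopDown_alt (nums : List Int) : Bool :=
  decide (0 ≤ (scoreM nums 0 (nums.length - 1) PySem.Dict.empty).1)

-- ===== PRECONDITION & SPEC =====
-- Pre_ excludes only the empty list, on which the Python A raises IndexError (dp[0][-1])
-- and the Python B raises IndexError too (nums[0]).
def Pre_predictTheWinnerTopDown (nums : List Int) : Prop := nums ≠ []
instance (nums : List Int) : Decidable (Pre_predictTheWinnerTopDown nums) := by
  unfold Pre_predictTheWinnerTopDown; infer_instance

def pvWitness_predictTheWinnerTopDown : List Int := [1, 5, 2]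

def Spec_predictTheWinnerTopDown (nums : List Int) (out : Bool) : Prop :=
  out = predictTheWinnerTopDown_alt nums
instance (nums : List Int) (out : Bool) : Decidable (Spec_predictTheWinnerTopDown nums out) := by
  unfold Spec_predictTheWinnerTopDown; infer_instance

-- ===== CLAIM (what is proved, stated in full; the proofs are below) =====
def Claim_equal_predictTheWinnerTopDown : Prop :=
  ∀ (nums : List Int), Dom_predictTheWinnerTopDown nums →
    Pre_predictTheWinnerTopDown nums →
    Spec_predictTheWinnerTopDown nums (predictTheWinnerTopDown nums)

-- ===== LEMMAS AND PROOFS =====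

-- reference value: optimal score difference over nums[i..j]
def scoreFn (nums : List Int) (i j : Nat) : Int :=
  if _h : j ≤ i then nums.getD i 0
  else max (nums.getD i 0 - scoreFn nums (i + 1) j)
           (nums.getD j 0 - scoreFn nums i (j - 1))
termination_by j - i
decreasing_by all_goals omega

theorem scoreFn_self (nums : List Int) (i : Nat) : scoreFn nums i i = nums.getD i 0 := by
  rw [scoreFn]; simp

theorem scoreFn_le (nums : List Int) (i j : Nat) (h : j ≤ i) :
    scoreFn nums i j = nums.getD i 0 := by
  rw [scoreFn]; simp [h]

theorem scoreFn_lt (nums : List Int) (i j : Nat) (h : i < j) :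
    scoreFn nums i j = max (nums.getD i 0 - scoreFn nums (i + 1) j)
                           (nums.getD j 0 - scoreFn nums i (j - 1)) := by
  rw [scoreFn]; simp [Nat.not_le.mpr h]

theorem getD_set_self {α : Type} (l : List α) (i : Nat) (h : i < l.length) (v d : α) :
    (l.set i v).getD i d = v := by
  simp [List.getD_eq_getElem?_getD, h]

theorem getD_set_ne {α : Type} (l : List α) (i j : Nat) (h : i ≠ j) (v d : α) :
    (l.set i v).getD j d = l.getD j d := by
  simp [List.getD_eq_getElem?_getD, List.getElem?_set_ne h]

-- ---------- B side ----------

-- memo invariant: every cached entry is the true interval value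
def MemoOK (nums : List Int) (memo : PySem.Dict (Nat × Nat) Int) : Prop :=
  ∀ i j : Nat, memo.contains (i, j) = true → memo.getD (i, j) 0 = scoreFn nums i j

theorem memoOK_empty (nums : List Int) : MemoOK nums PySem.Dict.empty := by
  intro i j h
  simp [PySem.Dict.contains_empty] at h

theorem memoOK_insert (nums : List Int) (memo : PySem.Dict (Nat × Nat) Int)
    (h : MemoOK nums memo) (i j : Nat) :
    MemoOK nums (memo.insert (i, j) (scoreFn nums i j)) := by
  intro i' j' hc
  rw [PySem.Dict.getD_insert]
  by_cases he : ((i', j') : Nat × Nat) = (i, j)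
  · rw [if_pos he]
    obtain ⟨h1, h2⟩ := Prod.mk.injEq .. ▸ he
    rw [h1, h2]
  · rw [if_neg he]
    rw [PySem.Dict.contains_insert] at hc
    have : ((i', j') == ((i, j) : Nat × Nat)) = false := by
      simpa using he
    rw [this] at hc
    simp only [Bool.false_or] at hc
    exact h i' j' hc

theorem scoreM_spec (nums : List Int) (i j : Nat) (memo : PySem.Dict (Nat × Nat) Int)
    (h : MemoOK nums memo) :
    (scoreM nums i j memo).1 = scoreFn nums i j ∧ MemoOK nums (scoreM nums i j memo).2 := by
  rw [scoreM]
  by_cases hc : memo.contains (i, j) = true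
  · rw [if_pos hc]
    exact ⟨h i j hc, h⟩
  · rw [if_neg hc]
    by_cases hji : j ≤ i
    · rw [dif_pos hji]
      refine ⟨(scoreFn_le nums i j hji).symm, ?_⟩
      have := memoOK_insert nums memo h i j
      rwa [scoreFn_le nums i j hji] at this
    · rw [dif_neg hji]
      have hij : i < j := by omega
      obtain ⟨hv1, hm1⟩ := scoreM_spec nums (i + 1) j memo h
      obtain ⟨hv2, hm2⟩ := scoreM_spec nums i (j - 1) (scoreM nums (i + 1) j memo).2 hm1
      simp only []
      rw [hv1, hv2]
      refine ⟨(scoreFn_lt nums i j hij).symm, ?_⟩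
      have := memoOK_insert nums (scoreM nums i (j - 1) (scoreM nums (i + 1) j memo).2).2 hm2 i j
      rwa [scoreFn_lt nums i j hij] at this
termination_by j - i
decreasing_by all_goals omega

theorem alt_eq_score (nums : List Int) :
    predictTheWinnerTopDown_alt nums = decide (0 ≤ scoreFn nums 0 (nums.length - 1)) := by
  unfold predictTheWinnerTopDown_alt
  rw [(scoreM_spec nums 0 (nums.length - 1) PySem.Dict.empty (memoOK_empty nums)).1]

-- ---------- A side ----------

def getC (dp : List (List Int)) (i j : Nat) : Int := (dp.getD i []).getD j 0

def setC (dp : List (List Int)) (i j : Nat) (v : Int) : List (List Int) :=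
  dp.set i ((dp.getD i []).set j v)

theorem getC_setC_self (dp : List (List Int)) (i j : Nat) (v : Int)
    (hi : i < dp.length) (hj : j < (dp.getD i []).length) :
    getC (setC dp i j v) i j = v := by
  unfold getC setC
  rw [getD_set_self _ _ hi _ _, getD_set_self _ _ hj _ _]

theorem getC_setC_ne (dp : List (List Int)) (i j i' j' : Nat) (v : Int)
    (h : i ≠ i' ∨ j ≠ j') :
    getC (setC dp i j v) i' j' = getC dp i' j' := by
  unfold getC setC
  by_cases hii : i = i'
  · subst hii
    have hjj : j ≠ j' := h.resolve_left (fun h' => h' rfl)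
    by_cases hlt : i < dp.length
    · rw [getD_set_self _ _ hlt _ _, getD_set_ne _ _ _ hjj _ _]
    · rw [List.set_eq_of_length_le (by omega)]
  · rw [getD_set_ne _ _ _ hii _ _]

theorem setC_len (dp : List (List Int)) (i j : Nat) (v : Int) :
    (setC dp i j v).length = dp.length := by simp [setC]

theorem setC_rows (dp : List (List Int)) (i j : Nat) (v : Int) (k : Nat) :
    ((setC dp i j v).getD k []).length = (dp.getD k []).length := by
  unfold setC
  by_cases hik : i = k
  · subst hik
    by_cases hlt : i < dp.length
    · rw [getD_set_self _ _ hlt _ _]; simp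
    · rw [List.set_eq_of_length_le (by omega)]
  · rw [getD_set_ne _ _ _ hik _ _]

-- shape invariant for A's table
def ShapeA (nums : List Int) (dp : List (List Int)) : Prop :=
  dp.length = nums.length ∧ ∀ k, k < nums.length → (dp.getD k []).length = nums.length

-- diagonal initialisation of A
theorem initA (nums : List Int) :
    ∀ (k a : Nat) (dp : List (List Int)), a + k = nums.length → ShapeA nums dp →
    (∀ i, i < a → getC dp i i = nums.getD i 0) →
    ShapeA nums ((List.range' a k).foldl
      (fun dp i => dp.set i ((dp.getD i []).set i (nums.getD i 0))) dp) ∧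
    (∀ i, i < nums.length → getC ((List.range' a k).foldl
      (fun dp i => dp.set i ((dp.getD i []).set i (nums.getD i 0))) dp) i i = nums.getD i 0) := by
  intro k
  induction k with
  | zero =>
    intro a dp hsum hsh hdiag
    simp only [List.range'_zero, List.foldl_nil]
    exact ⟨hsh, fun i hi => hdiag i (by omega)⟩
  | succ k ih =>
    intro a dp hsum hsh hdiag
    rw [List.range'_succ, List.foldl_cons]
    have han : a < nums.length := by omega
    have hstep : ShapeA nums (setC dp a a (nums.getD a 0)) ∧
        ∀ i, i < a + 1 → getC (setC dp a a (nums.getD a 0)) i i = nums.getD i 0 := by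
      constructor
      · exact ⟨by rw [setC_len]; exact hsh.1, fun t ht => by rw [setC_rows]; exact hsh.2 t ht⟩
      · intro i hi
        by_cases hia : i = a
        · subst hia
          exact getC_setC_self dp i i _ (by rw [hsh.1]; exact han) (by rw [hsh.2 i han]; exact han)
        · rw [getC_setC_ne dp a a i i _ (Or.inl (fun h => hia h.symm))]
          exact hdiag i (by omega)
    exact ih (a + 1) _ (by omega) hstep.1 hstep.2

-- correctness up to diagonal J
def DiagA (nums : List Int) (dp : List (List Int)) (J : Nat) : Prop :=
  ∀ i j, i ≤ j → j < nums.length → j - i ≤ J → getC dp i j = scoreFn nums i j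

-- A's inner step for diagonal d
def stepA (nums : List Int) (d : Nat) (dp : List (List Int)) (left : Nat) : List (List Int) :=
  dp.set left ((dp.getD left []).set (left + d)
    (max (nums.getD left 0 - (dp.getD (left + 1) []).getD (left + d) 0)
         (nums.getD (left + d) 0 - (dp.getD left []).getD (left + d - 1) 0)))

theorem innerA (nums : List Int) (d : Nat) (hd : 0 < d) (hdn : d < nums.length) :
    ∀ (k a : Nat) (dp : List (List Int)), a + k = nums.length - d →
    ShapeA nums dp → DiagA nums dp (d - 1) →
    (∀ l, l < a → getC dp l (l + d) = scoreFn nums l (l + d)) →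
    ShapeA nums ((List.range' a k).foldl (stepA nums d) dp) ∧
    DiagA nums ((List.range' a k).foldl (stepA nums d) dp) (d - 1) ∧
    (∀ l, l < nums.length - d →
      getC ((List.range' a k).foldl (stepA nums d) dp) l (l + d) = scoreFn nums l (l + d)) := by
  intro k
  induction k with
  | zero =>
    intro a dp hsum hsh hlow hdone
    simp only [List.range'_zero, List.foldl_nil]
    exact ⟨hsh, hlow, fun l hl => hdone l (by omega)⟩
  | succ k ih =>
    intro a dp hsum hsh hlow hdone
    rw [List.range'_succ, List.foldl_cons]
    have han : a + d < nums.length := by omega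
    have hr1 : (dp.getD (a + 1) []).getD (a + d) 0 = scoreFn nums (a + 1) (a + d) := by
      exact hlow (a + 1) (a + d) (by omega) han (by omega)
    have hr2 : (dp.getD a []).getD (a + d - 1) 0 = scoreFn nums a (a + d - 1) := by
      exact hlow a (a + d - 1) (by omega) (by omega) (by omega)
    have hvset : stepA nums d dp a = setC dp a (a + d)
        (max (nums.getD a 0 - scoreFn nums (a + 1) (a + d))
             (nums.getD (a + d) 0 - scoreFn nums a (a + d - 1))) := by
      unfold stepA setC
      rw [hr1, hr2]
    have hval : max (nums.getD a 0 - scoreFn nums (a + 1) (a + d))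
        (nums.getD (a + d) 0 - scoreFn nums a (a + d - 1)) = scoreFn nums a (a + d) := by
      rw [scoreFn_lt nums a (a + d) (by omega)]
    have hsh' : ShapeA nums (stepA nums d dp a) := by
      rw [hvset]
      exact ⟨by rw [setC_len]; exact hsh.1, fun t ht => by rw [setC_rows]; exact hsh.2 t ht⟩
    have hlow' : DiagA nums (stepA nums d dp a) (d - 1) := by
      intro i j hij hjn hdiff
      rw [hvset, getC_setC_ne]
      · exact hlow i j hij hjn hdiff
      · by_cases hia : a = i
        · subst hia; right; omega
        · exact Or.inl hia
    have hdone' : ∀ l, l < a + 1 → getC (stepA nums d dp a) l (l + d) = scoreFn nums l (l + d) := by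
      intro l hl
      by_cases hla : l = a
      · subst hla
        rw [hvset, getC_setC_self dp l (l + d) _ (by rw [hsh.1]; omega)
          (by rw [hsh.2 l (by omega)]; exact han),
            hval]
      · rw [hvset, getC_setC_ne dp a (a + d) l (l + d) _ (Or.inl (fun h => hla h.symm))]
        exact hdone l (by omega)
    exact ih (a + 1) _ (by omega) hsh' hlow' hdone'

theorem outerA (nums : List Int) :
    ∀ (k j0 : Nat) (dp : List (List Int)), 0 < j0 → j0 + k = nums.length →
    ShapeA nums dp → DiagA nums dp (j0 - 1) →
    DiagA nums ((List.range' j0 k).foldl (fun dp d =>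
      (List.range (nums.length - d)).foldl (stepA nums d) dp) dp) (nums.length - 1) := by
  intro k
  induction k with
  | zero =>
    intro j0 dp hj0 hsum hsh hdiag
    simp only [List.range'_zero, List.foldl_nil]
    intro i j hij hjn hdiff
    exact hdiag i j hij hjn (by omega)
  | succ k ih =>
    intro j0 dp hj0 hsum hsh hdiag
    rw [List.range'_succ, List.foldl_cons]
    have hdn : j0 < nums.length := by omega
    have hrange : List.range (nums.length - j0) = List.range' 0 (nums.length - j0) := by
      rw [List.range_eq_range']
    rw [hrange]
    obtain ⟨hsh', hlow', hdone'⟩ := innerA nums j0 hj0 hdn (nums.length - j0) 0 dp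
      (by omega) hsh hdiag (by omega)
    refine ih (j0 + 1) _ (by omega) (by omega) hsh' ?_
    intro i j hij hjn hdiff
    by_cases hc : j - i ≤ j0 - 1
    · exact hlow' i j hij hjn hc
    · have hji : j = i + j0 := by omega
      subst hji
      exact hdone' i (by omega)

theorem a_eq_score (nums : List Int) (h : nums ≠ []) :
    predictTheWinnerTopDown nums = decide (0 ≤ scoreFn nums 0 (nums.length - 1)) := by
  have hn : 0 < nums.length := List.length_pos_iff.mpr h
  unfold predictTheWinnerTopDown
  simp only []
  have hsh0 : ShapeA nums (List.replicate nums.length (List.replicate nums.length (0 : Int))) := by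
    refine ⟨by simp, ?_⟩
    intro k hk
    rw [List.getD_eq_getElem?_getD, List.getElem?_replicate, if_pos (by simpa using hk)]; simp
  have hrange : List.range nums.length = List.range' 0 nums.length := List.range_eq_range'
  rw [hrange]
  obtain ⟨hsh1, hdiag1⟩ := initA nums nums.length 0 _ (by omega) hsh0 (by omega)
  have hdiagA : DiagA nums ((List.range' 0 nums.length).foldl
      (fun dp i => dp.set i ((dp.getD i []).set i (nums.getD i 0)))
      (List.replicate nums.length (List.replicate nums.length (0 : Int)))) 0 := by
    intro i j hij hjn hdiff
    have hji : j = i := by omega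
    subst hji
    rw [scoreFn_self]
    exact hdiag1 j hjn
  have hfinal := outerA nums (nums.length - 1) 1 _ (by omega) (by omega) hsh1
    (by simpa using hdiagA)
  have hres := hfinal 0 (nums.length - 1) (by omega) (by omega) (by omega)
  have hstepEq : (fun (dp : List (List Int)) (d : Nat) =>
      (List.range (nums.length - d)).foldl (fun dp left =>
        dp.set left ((dp.getD left []).set (left + d)
          (max (nums.getD left 0 - (dp.getD (left + 1) []).getD (left + d) 0)
               (nums.getD (left + d) 0 - (dp.getD left []).getD (left + d - 1) 0)))) dp)
      = (fun dp d => (List.range (nums.length - d)).foldl (stepA nums d) dp) := by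
    rfl
  rw [hstepEq]
  unfold getC at hres
  rw [hres]

-- ===== VERDICT (by name: the statement is the Claim_ definition above) =====
theorem predictTheWinnerTopDown_spec : Claim_equal_predictTheWinnerTopDown := by
  intro nums _ hpre
  unfold Spec_predictTheWinnerTopDown
  rw [a_eq_score nums hpre, alt_eq_score nums]
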